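-- pv_equiv track=rewrite | github.com/peterdobbs77/daily-coding | py/sample_algos/tape_equilibrium.py | solution
-- ===== SOURCE A (Python) =====
-- def solution(A):
--     '''Given an array `A` of `N` integers,
--         split array into two non-empty parts at position `P` (where 1<=P<N)
--         such that the absolute difference between the sum of the two parts is minimized
--         Return the minimum absolute difference'''
--     total = sum(A)
--     left_sum = 0
--     min_abs_diff = None
--     for p in range(1, len(A)):
--         left_sum += A[p-1]
--         right_sum = total - left_sum
--         if min_abs_diff is None:
--             min_abs_diff = abs(left_sum - right_sum)
--         min_abs_diff = min(min_abs_diff, abs(left_sum - right_sum))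
--
--     return min_abs_diff
-- ===== SOURCE B (Python) =====
-- def solution(A):
--     '''Given an array `A` of `N` integers,
--         split array into two non-empty parts at position `P` (where 1<=P<N)
--         such that the absolute difference between the sum of the two parts is minimized
--         Return the minimum absolute difference'''
--     if len(A) < 2:
--         return None
--     total = sum(A)
--     prefixes = []
--     s = 0
--     for x in A[:-1]:
--         s += x
--         prefixes.append(s)
--     prefixes.sort()
--     # |left-right| = |2*s - total| is decreasing then increasing over the sorted
--     # prefix sums, so the minimum sits at the first s with 2*s >= total (or at
--     # the last s below it).
--     prev = None
--     for s in prefixes: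
--         if 2 * s >= total:
--             cand = 2 * s - total
--             return cand if prev is None else min(prev, cand)
--         prev = total - 2 * s
--     return prev
-- ===== Notes on version B (the rewrite author's own statement) =====
-- stated objective: alternative
-- what changed: B sorts the prefix sums and exploits that |2*s-total| is unimodal (decreasing then increasing) over them, so it returns the candidate at the first sorted prefix with 2*s >= total (vs its predecessor), instead of A's running left/right sums with a running minimum over all splits.
-- outside the precondition, e.g. on solution([5]): A returns None, B returns None; on solution([]): A returns None, B returns None
import Mathlib
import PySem

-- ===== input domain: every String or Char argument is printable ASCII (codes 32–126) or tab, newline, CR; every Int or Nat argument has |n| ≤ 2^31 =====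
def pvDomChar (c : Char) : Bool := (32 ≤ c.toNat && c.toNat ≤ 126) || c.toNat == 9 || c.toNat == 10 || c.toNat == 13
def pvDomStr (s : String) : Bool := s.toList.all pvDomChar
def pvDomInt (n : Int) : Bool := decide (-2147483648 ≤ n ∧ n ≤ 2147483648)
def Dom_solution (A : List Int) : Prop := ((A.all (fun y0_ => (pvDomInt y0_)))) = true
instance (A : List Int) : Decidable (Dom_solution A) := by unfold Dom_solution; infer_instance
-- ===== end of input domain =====

-- B sorts the prefix sums and picks the candidate at the crossing point 2*s >= total
-- (|2*s-total| is unimodal over sorted prefixes), instead of A's running left/right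
-- sums with a running minimum over all splits (alternative algorithm, similar cost).


-- ===== PORT A =====
def solution (A : List Int) : Int :=
  let total := A.sum
  let res := (PySem.List.pyRange 1 (A.length : Int) 1).foldl
    (fun (s : Int × Option Int) (p : Int) =>
      let left_sum := s.1 + PySem.List.pyGetD A (p - 1) 0
      let right_sum := total - left_sum
      let m0 := match s.2 with
        | none => |left_sum - right_sum|
        | some m => m
      (left_sum, some (min m0 |left_sum - right_sum|)))
    ((0 : Int), (none : Option Int))
  -- Python returns None when the loop never runs; Pre_solution excludes that, so .getD 0 is unreachable padding to Int
  res.2.getD 0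

-- ===== PORT B =====
/-- B's second loop: walk the sorted prefixes, overwriting `prev` with total-2*s
    until the first s with 2*s >= total, where it returns early. -/
def pvScanB (total : Int) : List Int → Option Int → Option Int
  | [], prev => prev
  | s :: rest, prev =>
    if total ≤ 2 * s then
      let cand := 2 * s - total
      some (match prev with
        | none => cand
        | some m => min m cand)
    else pvScanB total rest (some (total - 2 * s))

def solution_alt (A : List Int) : Int :=
  if A.length < 2 then 0  -- Python returns None here; Pre_solution excludes it
  else
    let total := A.sum
    let prefixes := ((PySem.List.slice A none (some (-1))).foldl
      (fun (acc : List Int × Int) (x : Int) =>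
        let s := acc.2 + x
        (acc.1 ++ [s], s)) (([] : List Int), (0 : Int))).1
    let sortedp := PySem.List.sorted prefixes (fun y => y) false
    -- Python returns None when sortedp is empty; Pre_solution excludes that
    (pvScanB total sortedp none).getD 0

-- ===== PRECONDITION & SPEC =====
-- Pre_ excludes lists of length < 2, on which A (and B) return None, which is not an Int.
def Pre_solution (A : List Int) : Prop := 2 ≤ A.length
instance (A : List Int) : Decidable (Pre_solution A) := by unfold Pre_solution; infer_instance
def pvWitness_solution : List Int := [1, 2]

def Spec_solution (A : List Int) (out : Int) : Prop := out = solution_alt A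
instance (A : List Int) (out : Int) : Decidable (Spec_solution A out) := by unfold Spec_solution; infer_instance

-- ===== CLAIM (what is proved, stated in full; the proofs are below) =====
def Claim_equal_solution : Prop := ∀ (A : List Int), Dom_solution A → Pre_solution A → Spec_solution A (solution A)

-- ===== LEMMAS AND PROOFS =====

/-- Prefix sums of `L` starting from running sum `l0`. -/
def pvPrefixFrom (l0 : Int) : List Int → List Int
  | [] => []
  | x :: t => (l0 + x) :: pvPrefixFrom (l0 + x) t

/-- A's loop step, with the element already fetched. -/
def pvStepA (total : Int) (s : Int × Option Int) (x : Int) : Int × Option Int :=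
  let left_sum := s.1 + x
  let right_sum := total - left_sum
  let m0 := match s.2 with
    | none => |left_sum - right_sum|
    | some m => m
  (left_sum, some (min m0 |left_sum - right_sum|))

lemma pv_loopA_eq (A : List Int) {σ : Type} (g : σ → Int → σ) (init : σ) :
    (PySem.List.pyRange 1 (A.length : Int) 1).foldl
      (fun s p => g s (PySem.List.pyGetD A (p - 1) 0)) init
    = A.dropLast.foldl g init := by
  rw [← PySem.List.foldl_pyRange_zero_pyGetD' A.dropLast 0 g init]
  rw [PySem.List.pyRange_one, PySem.List.pyRange_one, List.foldl_map, List.foldl_map]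
  have hlen : (((A.dropLast.length : Int)) - 0).toNat = ((A.length : Int) - 1).toNat := by
    simp [List.length_dropLast]
  rw [hlen]
  apply List.foldl_ext
  intro a k hk
  have hk' : k < A.length - 1 := by
    have := List.mem_range.mp hk; omega
  have h1 : (1 : Int) + (k : Int) - 1 = (k : Int) := by ring
  have h2 : (0 : Int) + (k : Int) = (k : Int) := by ring
  rw [h1, h2, PySem.List.pyGetD_natCast, PySem.List.pyGetD_natCast,
    List.getD_eq_getElem _ _ (by omega), List.getD_eq_getElem _ _ (by simp [List.length_dropLast]; omega),
    List.getElem_dropLast]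

lemma pv_foldA_some (total : Int) (L : List Int) (l0 m : Int) :
    (L.foldl (pvStepA total) (l0, some m)).2
    = some (((pvPrefixFrom l0 L).map (fun s => |2 * s - total|)).foldl min m) := by
  induction L generalizing l0 m with
  | nil => rfl
  | cons x t ih =>
    simp only [List.foldl_cons, pvStepA, pvPrefixFrom, List.map_cons]
    rw [ih]
    congr 2
    ring_nf

lemma pv_foldA_none (total : Int) (x : Int) (t : List Int) (l0 : Int) :
    ((x :: t).foldl (pvStepA total) (l0, none)).2
    = some (((pvPrefixFrom (l0 + x) t).map (fun s => |2 * s - total|)).foldl min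
        (|2 * (l0 + x) - total|)) := by
  simp only [List.foldl_cons, pvStepA]
  rw [pv_foldA_some]
  congr 2 <;> (simp; ring_nf)

lemma pv_build_prefixes (A : List Int) (init : List Int) (l0 : Int) :
    (A.foldl (fun (acc : List Int × Int) (x : Int) => (acc.1 ++ [acc.2 + x], acc.2 + x))
      (init, l0)).1 = init ++ pvPrefixFrom l0 A := by
  induction A generalizing init l0 with
  | nil => simp [pvPrefixFrom]
  | cons x t ih => simp [pvPrefixFrom, ih]

lemma pv_foldl_min_min (a c : Int) (L : List Int) :
    L.foldl min (min a c) = min a (L.foldl min c) := by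
  induction L generalizing c with
  | nil => rfl
  | cons x t ih =>
    simp only [List.foldl_cons]
    rw [min_assoc, ih]

lemma pv_foldl_min_self (a : Int) (L : List Int) :
    (a :: L).foldl min a = L.foldl min a := by
  simp [List.foldl_cons]

lemma pv_foldl_min_perm (a : Int) {L1 L2 : List Int} (h : L1.Perm L2) :
    L1.foldl min a = L2.foldl min a := by
  induction h generalizing a with
  | nil => rfl
  | cons x _ ih => simp only [List.foldl_cons]; exact ih _
  | swap x y l =>
    simp only [List.foldl_cons]
    rw [min_assoc, min_comm y x, ← min_assoc]
  | trans _ _ ih1 ih2 => exact (ih1 a).trans (ih2 a)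

/-- Head-seeded min fold only depends on the multiset of elements. -/
lemma pv_foldl_min_head_perm {a b : Int} {r1 r2 : List Int}
    (h : (a :: r1).Perm (b :: r2)) :
    r1.foldl min a = r2.foldl min b := by
  have hX : r1.foldl min a = min a (r2.foldl min b) := by
    rw [← pv_foldl_min_self a r1, pv_foldl_min_perm a h]
    simp only [List.foldl_cons]
    exact pv_foldl_min_min a b r2
  have hY : r2.foldl min b = min b (r1.foldl min a) := by
    rw [← pv_foldl_min_self b r2, pv_foldl_min_perm b h.symm]
    simp only [List.foldl_cons]
    exact pv_foldl_min_min b a r1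
  have h1 : r1.foldl min a ≤ r2.foldl min b := hX ▸ min_le_right _ _
  have h2 : r2.foldl min b ≤ r1.foldl min a := hY ▸ min_le_right _ _
  exact le_antisymm h1 h2

lemma pv_foldl_min_of_le (m : Int) (L : List Int) (h : ∀ x ∈ L, m ≤ x) :
    L.foldl min m = m := by
  induction L generalizing m with
  | nil => rfl
  | cons x t ih =>
    simp only [List.foldl_cons]
    rw [min_eq_left (h x (by simp))]
    exact ih m (fun y hy => h y (by simp [hy]))

/-- The scan on a sorted tail, seeded with the previous (below-threshold) element. -/
lemma pv_scanB_seeded (total : Int) (L : List Int) (s0 : Int)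
    (hs : L.Pairwise (fun a b => a ≤ b)) (hall : ∀ t ∈ L, s0 ≤ t) (hlt : 2 * s0 < total) :
    pvScanB total L (some (total - 2 * s0))
    = some ((L.map (fun s => |2 * s - total|)).foldl min (total - 2 * s0)) := by
  induction L generalizing s0 with
  | nil => rfl
  | cons x t ih =>
    have hx : s0 ≤ x := hall x (by simp)
    have hpt : t.Pairwise (fun a b => a ≤ b) := hs.tail
    have hxt : ∀ y ∈ t, x ≤ y := fun y hy => (List.pairwise_cons.mp hs).1 y hy
    simp only [pvScanB, List.map_cons, List.foldl_cons]
    split_ifs with hcr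
    · -- crossing: |2x - total| = 2x - total, and every later element is ≥ it
      have habs : |2 * x - total| = 2 * x - total := abs_of_nonneg (by omega)
      have : (t.map (fun s => |2 * s - total|)).foldl min (min (total - 2 * s0) (2 * x - total))
          = min (total - 2 * s0) (2 * x - total) := by
        apply pv_foldl_min_of_le
        intro v hv
        obtain ⟨y, hy, rfl⟩ := List.mem_map.mp hv
        have hxy : x ≤ y := hxt y hy
        have h1 : 2 * x - total ≤ |2 * y - total| :=
          le_trans (by omega) (le_abs_self _)
        exact le_trans (min_le_right _ _) h1
      rw [habs, this]
    · -- below: prev is overwritten by total - 2*x, which is ≤ total - 2*s0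
      push Not at hcr
      have habs : |2 * x - total| = total - 2 * x := by
        rw [abs_of_nonpos (by omega)]; ring
      rw [ih x hpt hxt hcr, habs]
      have hmin : min (total - 2 * s0) (total - 2 * x) = total - 2 * x := by omega
      rw [hmin]

/-- The scan on a sorted nonempty list equals the min of all candidates. -/
lemma pv_scanB_sorted (total : Int) (q : Int) (t : List Int)
    (hs : (q :: t).Pairwise (fun a b => a ≤ b)) :
    pvScanB total (q :: t) none
    = some ((t.map (fun s => |2 * s - total|)).foldl min (|2 * q - total|)) := by
  have hqt : ∀ y ∈ t, q ≤ y := fun y hy => (List.pairwise_cons.mp hs).1 y hy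
  simp only [pvScanB]
  split_ifs with hcr
  · have habs : |2 * q - total| = 2 * q - total := abs_of_nonneg (by omega)
    rw [habs]
    refine congrArg some ?_
    symm
    apply pv_foldl_min_of_le
    intro v hv
    obtain ⟨y, hy, rfl⟩ := List.mem_map.mp hv
    have hqy : q ≤ y := hqt y hy
    exact le_trans (by omega) (le_abs_self _)
  · push Not at hcr
    have habs : |2 * q - total| = total - 2 * q := by
      rw [abs_of_nonpos (by omega)]; ring
    rw [pv_scanB_seeded total t q hs.tail hqt hcr, habs]

lemma pv_solution_eq (A : List Int) :
    solution A
    = ((PySem.List.pyRange 1 (A.length : Int) 1).foldl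
        (fun s p => pvStepA A.sum s (PySem.List.pyGetD A (p - 1) 0))
        ((0 : Int), (none : Option Int))).2.getD 0 := rfl

lemma pv_solution_alt_eq (A : List Int) (h : ¬ A.length < 2) :
    solution_alt A
    = (pvScanB A.sum
        (PySem.List.sorted
          (((PySem.List.slice A none (some (-1))).foldl
            (fun (acc : List Int × Int) (x : Int) => (acc.1 ++ [acc.2 + x], acc.2 + x))
            (([] : List Int), (0 : Int))).1) (fun y => y) false)
        none).getD 0 := by
  unfold solution_alt
  rw [if_neg h]

-- ===== VERDICT (by name: the statement is the Claim_ definition above) =====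
theorem solution_spec : Claim_equal_solution := by
  intro A _ hpre
  unfold Pre_solution at hpre
  unfold Spec_solution
  rw [pv_solution_eq, pv_solution_alt_eq A (by omega)]
  rw [pv_loopA_eq A (pvStepA A.sum) ((0 : Int), (none : Option Int))]
  rw [PySem.List.slice_to_neg_one, pv_build_prefixes A.dropLast [] 0, List.nil_append]
  obtain ⟨h, rest, hL⟩ : ∃ h rest, A.dropLast = h :: rest := by
    have hlen : A.dropLast.length = A.length - 1 := List.length_dropLast
    cases hdl : A.dropLast with
    | nil => exfalso; rw [hdl] at hlen; simp at hlen; omega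
    | cons a b => exact ⟨a, b, rfl⟩
  rw [hL]
  simp only [pvPrefixFrom]
  obtain ⟨q, t, hQ⟩ : ∃ q t,
      PySem.List.sorted ((0 + h) :: pvPrefixFrom (0 + h) rest) (fun y => y) false = q :: t := by
    cases hq : PySem.List.sorted ((0 + h) :: pvPrefixFrom (0 + h) rest) (fun y => y) false with
    | nil =>
      exfalso
      have hperm := PySem.List.sorted_perm ((0 + h) :: pvPrefixFrom (0 + h) rest) (fun y => y) false
      rw [hq] at hperm
      simpa using hperm.length_eq
    | cons a b => exact ⟨a, b, rfl⟩
  rw [hQ, pv_foldA_none A.sum h rest 0,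
    pv_scanB_sorted A.sum q t (by
      have := PySem.List.sorted_pairwise ((0 + h) :: pvPrefixFrom (0 + h) rest) (fun y => y)
      rwa [hQ] at this)]
  simp only [Option.getD_some]
  apply pv_foldl_min_head_perm
  have hperm := PySem.List.sorted_perm ((0 + h) :: pvPrefixFrom (0 + h) rest) (fun y => y) false
  rw [hQ] at hperm
  simpa using List.Perm.map (fun s => |2 * s - A.sum|) hperm.symm
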